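-- pv_equiv track=rewrite | github.com/Neverlbc/Telegram-Bot | bot/handlers/inventory.py | _price_template_labels
-- ===== SOURCE A (Python) =====
-- def _price_template_labels(lang: str, tier: str) -> dict[str, str]:
--     labels = {
--         "sku": {
--             "zh": "SKU型号" if tier == "vvip" else "SKU",
--             "en": "SKU model" if tier == "vvip" else "SKU",
--             "ru": "Модель SKU" if tier == "vvip" else "SKU",
--         },
--         "description": {"zh": "描述", "en": "Description", "ru": "Описание"},
--         "usd": {"zh": "美元", "en": "USD price", "ru": "Цена в USD"},
--         "rub": {"zh": "卢布", "en": "RUB price", "ru": "Цена в рублях"},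
--         "cny_ru": {
--             "zh": "人民币（俄罗斯地址）",
--             "en": "CNY (Russia address)",
--             "ru": "Юани (адрес в России)",
--         },
--         "cny_cn": {
--             "zh": "人民币（中国地址）",
--             "en": "CNY (China address)",
--             "ru": "Юани (адрес в Китае)",
--         },
--         "stock": {"zh": "库存", "en": "Stock", "ru": "Склад"},
--         "status": {"zh": "状态", "en": "Status", "ru": "Статус"},
--     }
--     return {key: label_by_lang.get(lang, label_by_lang["zh"]) for key, label_by_lang in labels.items()}
-- ===== SOURCE B (Python) =====
-- def _price_template_labels(lang: str, tier: str) -> dict[str, str]: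
--     sku_zh = "SKU型号" if tier == "vvip" else "SKU"
--     sku_en = "SKU model" if tier == "vvip" else "SKU"
--     sku_ru = "Модель SKU" if tier == "vvip" else "SKU"
--     by_lang = {
--         "zh": {
--             "sku": sku_zh,
--             "description": "描述",
--             "usd": "美元",
--             "rub": "卢布",
--             "cny_ru": "人民币（俄罗斯地址）",
--             "cny_cn": "人民币（中国地址）",
--             "stock": "库存",
--             "status": "状态",
--         },
--         "en": {
--             "sku": sku_en,
--             "description": "Description",
--             "usd": "USD price",
--             "rub": "RUB price",
--             "cny_ru": "CNY (Russia address)",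
--             "cny_cn": "CNY (China address)",
--             "stock": "Stock",
--             "status": "Status",
--         },
--         "ru": {
--             "sku": sku_ru,
--             "description": "Описание",
--             "usd": "Цена в USD",
--             "rub": "Цена в рублях",
--             "cny_ru": "Юани (адрес в России)",
--             "cny_cn": "Юани (адрес в Китае)",
--             "stock": "Склад",
--             "status": "Статус",
--         },
--     }
--     return by_lang.get(lang, by_lang["zh"])
-- ===== Notes on version B (the rewrite author's own statement) =====
-- stated objective: simpler
-- what changed: Transposed the constant table to be keyed by language, each holding the full field->label dict, so the per-field comprehension with per-field fallback lookups disappears and the result is a single by_lang.get(lang, by_lang['zh']).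
import Mathlib
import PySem

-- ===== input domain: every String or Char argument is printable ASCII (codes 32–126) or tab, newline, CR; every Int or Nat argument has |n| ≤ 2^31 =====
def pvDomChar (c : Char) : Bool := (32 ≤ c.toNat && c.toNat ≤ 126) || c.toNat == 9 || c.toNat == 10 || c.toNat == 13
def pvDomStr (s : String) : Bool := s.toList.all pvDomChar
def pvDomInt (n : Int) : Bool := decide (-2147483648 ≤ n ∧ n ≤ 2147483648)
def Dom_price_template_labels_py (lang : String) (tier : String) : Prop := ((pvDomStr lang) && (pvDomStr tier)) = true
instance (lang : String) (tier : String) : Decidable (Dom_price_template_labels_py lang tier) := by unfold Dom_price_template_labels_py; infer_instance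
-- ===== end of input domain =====

-- B transposes the constant table: keyed by language, each holding the full field→label dict,
-- returned directly by one lookup with zh fallback — no per-field loop. Equivalence of return values.

-- ===== PORT A =====
-- A builds a dict field → (dict lang → label), then a comprehension picks, per field,
-- label_by_lang.get(lang, label_by_lang["zh"]). Every inner dict has "zh", so the
-- KeyError-raising label_by_lang["zh"] is ported exactly as getD "zh" "" (never the default).
def price_template_labels_py (lang : String) (tier : String) : List (String × String) :=
  let labels : PySem.Dict String (PySem.Dict String String) :=
    (((((((((PySem.Dict.empty).insert "sku"
      ((((PySem.Dict.empty).insert "zh" (if tier == "vvip" then "SKU型号" else "SKU")).insert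
          "en" (if tier == "vvip" then "SKU model" else "SKU")).insert
          "ru" (if tier == "vvip" then "Модель SKU" else "SKU"))).insert "description"
      ((((PySem.Dict.empty).insert "zh" "描述").insert "en" "Description").insert "ru" "Описание")).insert "usd"
      ((((PySem.Dict.empty).insert "zh" "美元").insert "en" "USD price").insert "ru" "Цена в USD")).insert "rub"
      ((((PySem.Dict.empty).insert "zh" "卢布").insert "en" "RUB price").insert "ru" "Цена в рублях")).insert "cny_ru"
      ((((PySem.Dict.empty).insert "zh" "人民币（俄罗斯地址）").insert "en" "CNY (Russia address)").insert "ru" "Юани (адрес в России)")).insert "cny_cn"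
      ((((PySem.Dict.empty).insert "zh" "人民币（中国地址）").insert "en" "CNY (China address)").insert "ru" "Юани (адрес в Китае)")).insert "stock"
      ((((PySem.Dict.empty).insert "zh" "库存").insert "en" "Stock").insert "ru" "Склад")).insert "status"
      ((((PySem.Dict.empty).insert "zh" "状态").insert "en" "Status").insert "ru" "Статус"))
  (labels.items.foldl (fun acc kv =>
      PySem.Dict.insert acc kv.1 (kv.2.getD lang (kv.2.getD "zh" ""))) PySem.Dict.empty).items

-- ===== PORT B =====
def price_template_labels_py_alt (lang : String) (tier : String) : List (String × String) :=
  let sku_zh := if tier == "vvip" then "SKU型号" else "SKU"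
  let sku_en := if tier == "vvip" then "SKU model" else "SKU"
  let sku_ru := if tier == "vvip" then "Модель SKU" else "SKU"
  let zh : List (String × String) :=
    [("sku", sku_zh), ("description", "描述"), ("usd", "美元"), ("rub", "卢布"),
     ("cny_ru", "人民币（俄罗斯地址）"), ("cny_cn", "人民币（中国地址）"), ("stock", "库存"), ("status", "状态")]
  let en : List (String × String) :=
    [("sku", sku_en), ("description", "Description"), ("usd", "USD price"), ("rub", "RUB price"),
     ("cny_ru", "CNY (Russia address)"), ("cny_cn", "CNY (China address)"), ("stock", "Stock"), ("status", "Status")]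
  let ru : List (String × String) :=
    [("sku", sku_ru), ("description", "Описание"), ("usd", "Цена в USD"), ("rub", "Цена в рублях"),
     ("cny_ru", "Юани (адрес в России)"), ("cny_cn", "Юани (адрес в Китае)"), ("stock", "Склад"), ("status", "Статус")]
  let by_lang : PySem.Dict String (List (String × String)) :=
    (((PySem.Dict.empty).insert "zh" zh).insert "en" en).insert "ru" ru
  by_lang.getD lang (by_lang.getD "zh" [])

-- ===== PRECONDITION & SPEC =====
def Spec_price_template_labels_py (lang : String) (tier : String) (out : List (String × String)) : Prop := out = price_template_labels_py_alt lang tier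
instance (lang : String) (tier : String) (out : List (String × String)) : Decidable (Spec_price_template_labels_py lang tier out) := by unfold Spec_price_template_labels_py; infer_instance

-- ===== CLAIM (what is proved, stated in full; the proofs are below) =====
def Claim_equal_price_template_labels_py : Prop := ∀ (lang : String) (tier : String), Dom_price_template_labels_py lang tier → Spec_price_template_labels_py lang tier (price_template_labels_py lang tier)

-- ===== LEMMAS AND PROOFS =====

-- ===== VERDICT (by name: the statement is the Claim_ definition above) =====
theorem price_template_labels_py_spec : Claim_equal_price_template_labels_py := by
  intro lang tier _
  unfold Spec_price_template_labels_py price_template_labels_py price_template_labels_py_alt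
  by_cases hz : lang = "zh"
  · by_cases ht : tier = "vvip" <;>
      simp_all [PySem.Dict.insert, PySem.Dict.empty, PySem.Dict.getD, PySem.Dict.get?, List.foldl]
  · by_cases he : lang = "en"
    · by_cases ht : tier = "vvip" <;>
        simp_all [PySem.Dict.insert, PySem.Dict.empty, PySem.Dict.getD, PySem.Dict.get?, List.foldl]
    · by_cases hr : lang = "ru"
      · by_cases ht : tier = "vvip" <;>
          simp_all [PySem.Dict.insert, PySem.Dict.empty, PySem.Dict.getD, PySem.Dict.get?, List.foldl]
      · have h1 : (("zh" : String) == lang) = false := by simp [Ne.symm hz]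
        have h2 : (("en" : String) == lang) = false := by simp [Ne.symm he]
        have h3 : (("ru" : String) == lang) = false := by simp [Ne.symm hr]
        by_cases ht : tier = "vvip" <;>
          simp [PySem.Dict.insert, PySem.Dict.empty, PySem.Dict.getD, PySem.Dict.get?,
            List.foldl, List.find?, h1, h2, h3, ht]
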